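-- pv_equiv track=rewrite | github.com/miliar/Code_Jam_Webscraper | solutions_python/Problem_201/943.py | efficient
-- ===== SOURCE A (Python) =====
-- def efficient(N, k):
--     if N == k:
--         return (0,0)
--     elif k == 1:
--         return (max(N - 1 - N//2, N//2), min(N - 1 - N//2, N//2))
--     else:
--         if N % 2 == 0:
--             if k % 2 == 0:
--                 return efficient(N//2, k - k//2)
--             else:
--                 return efficient(N//2 - 1, k//2)
--         else:
--             if k % 2 == 0:
--                 return efficient(N//2, k - k//2)
--             else:
--                 return efficient(N//2, k//2)
-- ===== SOURCE B (Python) =====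
-- def efficient(N, k):
--     # closed form: the k-th person's segment after l = bit_length(k)-1 greedy halvings
--     l = k.bit_length() - 1
--     m = (N - k + (1 << l)) >> l
--     a, b = m - 1 - m // 2, m // 2
--     return (max(a, b), min(a, b))
-- ===== Notes on version B (the rewrite author's own statement) =====
-- stated objective: alternative
-- what changed: Replaced the four-branch recursion (one call per bit of k) by a closed form: with l = k.bit_length()-1, the k-th person's segment length is m = (N - k + 2^l) >> l, then the usual (max, min) split of m.
-- outside the precondition, e.g. on efficient(5, 0): A returns (0, 0), B raises ValueError; on efficient(0, 0): A returns (0, 0), B raises ValueError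
import Mathlib
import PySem

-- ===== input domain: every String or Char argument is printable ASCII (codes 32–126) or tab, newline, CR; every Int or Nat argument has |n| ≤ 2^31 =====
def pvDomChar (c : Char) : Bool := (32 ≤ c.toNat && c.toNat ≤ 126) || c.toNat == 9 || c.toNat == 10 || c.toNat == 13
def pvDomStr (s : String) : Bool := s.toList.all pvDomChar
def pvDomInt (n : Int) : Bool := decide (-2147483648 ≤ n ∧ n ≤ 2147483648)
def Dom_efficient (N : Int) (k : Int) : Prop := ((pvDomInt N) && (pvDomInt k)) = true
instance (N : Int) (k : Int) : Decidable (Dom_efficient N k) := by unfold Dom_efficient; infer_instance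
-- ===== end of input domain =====

-- B replaces A's per-bit-of-k recursion by a closed form (one bit_length and one shift).

-- ===== PORT A =====
-- A's recursion can diverge for k < 1 (see Pre_); it is ported with fuel k.natAbs + 1,
-- which exceeds the number of recursive calls on every input with 1 ≤ k (k is at least
-- halved each step), so the fuel-exhausted branch is unreachable under Pre_efficient.
def efficientFuel : Nat → Int → Int → Int × Int
  | 0, _, _ => (0, 0)   -- fuel exhausted; unreachable under Pre_efficient
  | fuel+1, N, k =>
    if N = k then (0, 0)
    else if k = 1 then
      (max (N - 1 - PySem.Int.floordiv N 2) (PySem.Int.floordiv N 2),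
       min (N - 1 - PySem.Int.floordiv N 2) (PySem.Int.floordiv N 2))
    else if PySem.Int.mod N 2 = 0 then
      if PySem.Int.mod k 2 = 0 then
        efficientFuel fuel (PySem.Int.floordiv N 2) (k - PySem.Int.floordiv k 2)
      else
        efficientFuel fuel (PySem.Int.floordiv N 2 - 1) (PySem.Int.floordiv k 2)
    else
      if PySem.Int.mod k 2 = 0 then
        efficientFuel fuel (PySem.Int.floordiv N 2) (k - PySem.Int.floordiv k 2)
      else
        efficientFuel fuel (PySem.Int.floordiv N 2) (PySem.Int.floordiv k 2)

def efficient (N : Int) (k : Int) : Int × Int := efficientFuel (k.natAbs + 1) N k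

-- ===== PORT B =====
-- k.bit_length() → PySem.Int.bitLength; Python's << and >> on ints are Lean's <<< and >>> (exact).
def efficient_alt (N : Int) (k : Int) : Int × Int :=
  let l : Nat := PySem.Int.bitLength k - 1
  let m : Int := (N - k + ((1 : Int) <<< l)) >>> l
  let a : Int := m - 1 - PySem.Int.floordiv m 2
  let b : Int := PySem.Int.floordiv m 2
  (max a b, min a b)

-- ===== PRECONDITION & SPEC =====
-- Pre_ restricts to the problem's natural domain k ≥ 1 (the contest guarantees 1 ≤ K ≤ N):
-- for k ≤ 0 A diverges on part of the plane (e.g. N = -2, k = -1) and elsewhere returns a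
-- degenerate (0, 0), while B's bit-length closed form is undefined there (Python raises ValueError).
def Pre_efficient (N : Int) (k : Int) : Prop := 1 ≤ k
instance (N : Int) (k : Int) : Decidable (Pre_efficient N k) := by unfold Pre_efficient; infer_instance
def pvWitness_efficient : Int × Int := (8, 3)

def Spec_efficient (N : Int) (k : Int) (out : Int × Int) : Prop := out = efficient_alt N k
instance (N : Int) (k : Int) (out : Int × Int) : Decidable (Spec_efficient N k out) := by unfold Spec_efficient; infer_instance

-- ===== CLAIM (what is proved, stated in full; the proofs are below) =====
def Claim_equal_efficient : Prop := ∀ (N : Int) (k : Int), Dom_efficient N k → Pre_efficient N k → Spec_efficient N k (efficient N k)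

-- ===== LEMMAS AND PROOFS =====

theorem fd2 (a : Int) : PySem.Int.floordiv a 2 = a / 2 :=
  PySem.Int.floordiv_eq_ediv_of_pos (by norm_num)

theorem md2 (a : Int) : PySem.Int.mod a 2 = a % 2 :=
  PySem.Int.mod_eq_emod_of_pos (by norm_num)

-- B at k = 1 is the base formula with m = N
theorem alt_one (N : Int) : efficient_alt N 1 =
    (max (N - 1 - PySem.Int.floordiv N 2) (PySem.Int.floordiv N 2),
     min (N - 1 - PySem.Int.floordiv N 2) (PySem.Int.floordiv N 2)) := by
  have h1 : PySem.Int.bitLength 1 = 1 := by decide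
  simp [efficient_alt, h1]

-- B on the diagonal gives (0, 0): m = 2^l >>> l = 1
theorem alt_diag (N : Int) : efficient_alt N N = (0, 0) := by
  simp [efficient_alt]

theorem bl_pos (k : Int) (hk : 0 < k) : 1 ≤ PySem.Int.bitLength k := by
  rw [PySem.Int.bitLength_of_pos hk]; omega

-- the closed form is invariant under one step of A's recursion
theorem alt_step (N k : Int) (hk : 2 ≤ k) :
    efficient_alt (PySem.Int.floordiv (N - PySem.Int.mod k 2) 2) (PySem.Int.floordiv k 2)
      = efficient_alt N k := by
  have hbl : PySem.Int.bitLength k = PySem.Int.bitLength (PySem.Int.floordiv k 2) + 1 :=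
    PySem.Int.bitLength_of_pos (by omega)
  have hbl' : 1 ≤ PySem.Int.bitLength (PySem.Int.floordiv k 2) := by
    apply bl_pos; rw [fd2]; omega
  set l' : Nat := PySem.Int.bitLength (PySem.Int.floordiv k 2) - 1 with hl'
  have hL : PySem.Int.bitLength k - 1 = l' + 1 := by omega
  have hm : (PySem.Int.floordiv (N - PySem.Int.mod k 2) 2 - PySem.Int.floordiv k 2
        + ((1:Int) <<< l')) >>> l'
      = (N - k + ((1:Int) <<< (l' + 1))) >>> (l' + 1) := by
    rw [Int.shiftLeft_eq, Int.shiftLeft_eq, Int.shiftRight_eq_div_pow,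
      Int.shiftRight_eq_div_pow, fd2, fd2, md2]
    push_cast
    simp only [one_mul]
    rw [show ((2:Int)^(l'+1)) = 2 * 2^l' by ring,
      ← Int.ediv_ediv_of_nonneg (by norm_num : (0:Int) ≤ 2)]
    congr 1
    have hA : (0:Int) < 2^l' := by positivity
    set A : Int := 2^l'
    omega
  simp only [efficient_alt, hL, ← hl', hm]

theorem main_lemma (f : Nat) : ∀ (N k : Int), 1 ≤ k → k.natAbs < f →
    efficientFuel f N k = efficient_alt N k := by
  induction f with
  | zero => intro N k _ hf; omega
  | succ f ih =>
    intro N k hk hf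
    by_cases h1 : N = k
    · subst h1; simp only [efficientFuel]; exact (alt_diag N).symm
    by_cases h2 : k = 1
    · subst h2; simp only [efficientFuel, if_neg h1]; exact (alt_one N).symm
    have hk2 : 2 ≤ k := by omega
    have hfd : 1 ≤ PySem.Int.floordiv k 2 := by rw [fd2]; omega
    have hfa : (PySem.Int.floordiv k 2).natAbs < f := by rw [fd2]; omega
    simp only [efficientFuel, if_neg h1, if_neg h2]
    by_cases hN : PySem.Int.mod N 2 = 0 <;> by_cases hK : PySem.Int.mod k 2 = 0 <;>
      simp only [hN, hK, if_pos, if_false]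
    · -- N even, k even
      have e1 : k - PySem.Int.floordiv k 2 = PySem.Int.floordiv k 2 := by
        rw [fd2]; rw [md2] at hK; omega
      have e2 : PySem.Int.floordiv N 2 = PySem.Int.floordiv (N - PySem.Int.mod k 2) 2 := by
        rw [hK]; norm_num
      rw [e1, e2, ih _ _ hfd hfa, alt_step N k hk2]
    · -- N even, k odd
      have e2 : PySem.Int.floordiv N 2 - 1 = PySem.Int.floordiv (N - PySem.Int.mod k 2) 2 := by
        rw [fd2, fd2, md2]; rw [md2] at hN hK; omega
      rw [e2, ih _ _ hfd hfa, alt_step N k hk2]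
    · -- N odd, k even
      have e1 : k - PySem.Int.floordiv k 2 = PySem.Int.floordiv k 2 := by
        rw [fd2]; rw [md2] at hK; omega
      have e2 : PySem.Int.floordiv N 2 = PySem.Int.floordiv (N - PySem.Int.mod k 2) 2 := by
        rw [hK]; norm_num
      rw [e1, e2, ih _ _ hfd hfa, alt_step N k hk2]
    · -- N odd, k odd
      have e2 : PySem.Int.floordiv N 2 = PySem.Int.floordiv (N - PySem.Int.mod k 2) 2 := by
        rw [fd2, fd2, md2]; rw [md2] at hN hK; omega
      rw [e2, ih _ _ hfd hfa, alt_step N k hk2]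

-- ===== VERDICT (by name: the statement is the Claim_ definition above) =====
theorem efficient_spec : Claim_equal_efficient := by
  intro N k _ hpre
  unfold Spec_efficient
  exact main_lemma (k.natAbs + 1) N k hpre (Nat.lt_succ_self _)
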